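-- pv_equiv track=rewrite | github.com/muneebaifrah/Unstop-100-Days-Coding-Sprint | Day-13/2.UPPER_LEFT_BOTTOM_RIGHT.py | user_logic
-- ===== SOURCE A (Python) =====
-- def user_logic(n, m, grid):
--     def dfs(x, y, visited):
--         stack = [(x, y)]
--         visited[x][y] = True
--         min_x, max_x, min_y, max_y = x, x, y, y
--
--         while stack:
--             i, j = stack.pop()
--             for dx, dy in [(-1, 0), (0, -1), (1, 0), (0, 1)]:
--                 ni, nj = i + dx, j + dy
--                 if (0 <= ni < n) and (0 <= nj < m) and (not visited[ni][nj]) and (grid[ni][nj] == 1):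
--                     stack.append((ni, nj))
--                     visited[ni][nj] = True
--                     if ni <= min_x and nj <= min_y:
--                         min_x = ni
--                         min_y = nj
--                     if ni >= max_x and nj >= max_y:
--                         max_x = ni
--                         max_y = nj
--         return min_x, min_y, max_x, max_y
--
--     def dfs1(x, y, visited):
--         stack = [(x, y)]
--         visited[x][y] = True
--         min_x, max_x, min_y, max_y = x, x, y, y
--
--         while stack:
--             i, j = stack.pop()
--             for dx, dy in [(-1, 0), (0, -1), (1, 0), (0, 1)]:
--                 ni, nj = i + dx, j + dy
--                 if (0 <= ni < n) and (0 <= nj < m) and (not visited[ni][nj]) and (grid[ni][nj] == 1):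
--                     stack.append((ni, nj))
--                     visited[ni][nj] = True
--                     if  ni < min_x:
--                         min_x = ni
--                         min_y = nj
--                     if ni == min_x and nj <= min_y:
--                         min_y = nj
--
--                     if ni > max_x:
--                         max_x = ni
--                         max_y = nj
--                     if ni == max_x and nj >= max_y:
--                         max_y = nj
--         return min_x, min_y, max_x, max_y
--
--
--
--     visited = [[False] * m for _ in range(n)]
--     water_bodies = []
--
--     for i in range(n):
--         for j in range(m):
--             if grid[i][j] == 1 and not visited[i][j]:
--                 if n == 200 and m == 30:
--                     water_bodies.append(dfs1(i, j, visited))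
--                 else:
--                     water_bodies.append(dfs1(i, j, visited))
--     if water_bodies:
--         return water_bodies
--     return [[]]
--
--     pass
-- ===== SOURCE B (Python) =====
-- def user_logic(n, m, grid):
--     visited = set()
--     bodies = []
--     for i in range(n):
--         for j in range(m):
--             if grid[i][j] == 1 and (i, j) not in visited:
--                 comp = []
--                 stack = [(i, j)]
--                 visited.add((i, j))
--                 while stack:
--                     ci, cj = stack.pop()
--                     comp.append((ci, cj))
--                     for ni, nj in ((ci - 1, cj), (ci, cj - 1), (ci + 1, cj), (ci, cj + 1)):
--                         if 0 <= ni < n and 0 <= nj < m and (ni, nj) not in visited and grid[ni][nj] == 1: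
--                             visited.add((ni, nj))
--                             stack.append((ni, nj))
--                 mn = min(ci for ci, _ in comp)
--                 mx = max(ci for ci, _ in comp)
--                 mny = min(cj for ci, cj in comp if ci == mn)
--                 mxy = max(cj for ci, cj in comp if ci == mx)
--                 bodies.append((mn, mny, mx, mxy))
--     return bodies if bodies else [[]]
-- ===== Notes on version B (the rewrite author's own statement) =====
-- stated objective: simpler
-- what changed: A updates the four corner values (min row, its leftmost column, max row, its rightmost column) incrementally inside the flood-fill push loop with four order-sensitive if-chains; B's flood fill only collects the component's cells and computes those corners afterwards with plain min/max comprehensions restricted to the extreme rows.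
import Mathlib
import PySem

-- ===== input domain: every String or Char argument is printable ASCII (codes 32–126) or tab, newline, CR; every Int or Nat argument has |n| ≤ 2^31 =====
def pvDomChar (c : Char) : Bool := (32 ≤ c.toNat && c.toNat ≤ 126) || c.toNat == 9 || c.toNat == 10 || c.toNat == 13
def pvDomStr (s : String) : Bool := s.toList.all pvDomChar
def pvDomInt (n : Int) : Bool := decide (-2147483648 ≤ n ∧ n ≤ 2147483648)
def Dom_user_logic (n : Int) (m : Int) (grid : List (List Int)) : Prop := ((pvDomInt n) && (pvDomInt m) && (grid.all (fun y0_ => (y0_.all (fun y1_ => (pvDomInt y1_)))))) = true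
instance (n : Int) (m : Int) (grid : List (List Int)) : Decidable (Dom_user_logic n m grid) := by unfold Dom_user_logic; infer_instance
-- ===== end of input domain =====

-- B replaces A's incremental per-push corner bookkeeping by collecting each flood-filled
-- component first and computing its row-restricted corner columns in a separate pass (objective:
-- simpler; same asymptotic cost).

-- ===== PORT A =====
-- grid[i][j]; only evaluated under 0 ≤ i < n, 0 ≤ j < m, where Pre_ guarantees the entry exists
def getCell (grid : List (List Int)) (i j : Int) : Int :=
  PySem.List.pyGetD (PySem.List.pyGetD grid i []) j 0

def dirs : List (Int × Int) := [(-1, 0), (0, -1), (1, 0), (0, 1)]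

-- visited[i][j] (A's Python keeps a list-of-lists bool matrix)
def visAt (vis : List (List Bool)) (i j : Int) : Bool :=
  PySem.List.pyGetD (PySem.List.pyGetD vis i []) j false

-- visited[i][j] = True
def markA (vis : List (List Bool)) (i j : Int) : List (List Bool) :=
  PySem.List.pySetD vis i (PySem.List.pySetD (PySem.List.pyGetD vis i []) j true)

-- the four sequential ifs of dfs1 updating (min_x, min_y, max_x, max_y)
def updA : (Int × Int × Int × Int) → (Int × Int) → (Int × Int × Int × Int)
  | (mnx, mny, mxx, mxy), (r, s) =>
    let p := if r < mnx then (r, s) else (mnx, mny)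
    let p2 := if r = p.1 ∧ s ≤ p.2 then (p.1, s) else p
    let q := if r > mxx then (r, s) else (mxx, mxy)
    let q2 := if r = q.1 ∧ s ≥ q.2 then (q.1, s) else q
    (p2.1, p2.2, q2.1, q2.2)

-- one neighbour of dfs1's inner for-loop; state = (stack, visited, corners)
def stepA (n m : Int) (grid : List (List Int)) (i j : Int)
    (s : List (Int × Int) × List (List Bool) × (Int × Int × Int × Int)) (d : Int × Int) :
    List (Int × Int) × List (List Bool) × (Int × Int × Int × Int) :=
  let ni := i + d.1
  let nj := j + d.2
  if 0 ≤ ni ∧ ni < n ∧ 0 ≤ nj ∧ nj < m ∧ visAt s.2.1 ni nj = false ∧ getCell grid ni nj = 1 then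
    ((ni, nj) :: s.1, markA s.2.1 ni nj, updA s.2.2 (ni, nj))
  else s

-- the shared fuel bound of the two while-loop ports; proved sufficient below ('none' unreachable)
def fuelFor (n m : Int) : Nat := 2 * (n.toNat * m.toNat) + 2

-- dfs1's while-loop; the list head is Python's stack top (append/pop at the end)
def loopA (n m : Int) (grid : List (List Int)) :
    Nat → List (Int × Int) → List (List Bool) → (Int × Int × Int × Int) →
    Option ((Int × Int × Int × Int) × List (List Bool))
  | 0, _, _, _ => none
  | _ + 1, [], vis, q => some (q, vis)
  | f + 1, (i, j) :: rest, vis, q =>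
    let s := dirs.foldl (stepA n m grid i j) (rest, vis, q)
    loopA n m grid f s.1 s.2.1 s.2.2

def user_logic (n : Int) (m : Int) (grid : List (List Int)) : List (List Int) :=
  let init : List (List Bool) × List (List Int) :=
    (List.replicate n.toNat (List.replicate m.toNat false), [])
  let res := (PySem.List.pyRange 0 n 1).foldl (fun acc i =>
    (PySem.List.pyRange 0 m 1).foldl (fun acc j =>
      if getCell grid i j = 1 ∧ visAt acc.1 i j = false then
        -- Python's 'if n == 200 and m == 30' calls the same dfs1 in both branches
        if n = 200 ∧ m = 30 then
          match loopA n m grid (fuelFor n m) [(i, j)] (markA acc.1 i j) (i, j, i, j) with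
          | some (q, vis') => (vis', acc.2 ++ [[q.1, q.2.1, q.2.2.1, q.2.2.2]])
          | none => acc
        else
          match loopA n m grid (fuelFor n m) [(i, j)] (markA acc.1 i j) (i, j, i, j) with
          | some (q, vis') => (vis', acc.2 ++ [[q.1, q.2.1, q.2.2.1, q.2.2.2]])
          | none => acc
      else acc) acc) init
  match res.2 with
  | [] => [[]]
  | l => l

-- ===== PORT B =====
-- one neighbour of B's inner for-loop; state = (stack, visited set) — no corner bookkeeping
def stepB (n m : Int) (grid : List (List Int)) (i j : Int)
    (s : List (Int × Int) × PySem.Set (Int × Int)) (d : Int × Int) :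
    List (Int × Int) × PySem.Set (Int × Int) :=
  let ni := i + d.1
  let nj := j + d.2
  if 0 ≤ ni ∧ ni < n ∧ 0 ≤ nj ∧ nj < m ∧ PySem.Set.contains s.2 (ni, nj) = false ∧
      getCell grid ni nj = 1 then
    ((ni, nj) :: s.1, PySem.Set.add s.2 (ni, nj))
  else s

-- B's while-loop: it only collects the component's cells into comp
def loopB (n m : Int) (grid : List (List Int)) :
    Nat → List (Int × Int) → PySem.Set (Int × Int) → List (Int × Int) →
    Option (List (Int × Int) × PySem.Set (Int × Int))
  | 0, _, _, _ => none
  | _ + 1, [], vis, comp => some (comp, vis)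
  | f + 1, c :: rest, vis, comp =>
    let s := dirs.foldl (stepB n m grid c.1 c.2) (rest, vis)
    loopB n m grid f s.1 s.2 (comp ++ [c])

-- Source B's four min/max comprehensions over the collected component (comp is never empty)
def cornersOf (comp : List (Int × Int)) : List Int :=
  let mn := (PySem.List.min? (comp.map Prod.fst) (fun y => y)).getD 0
  let mx := (PySem.List.max? (comp.map Prod.fst) (fun y => y)).getD 0
  let mny := (PySem.List.min? ((comp.filter (fun p => p.1 == mn)).map Prod.snd) (fun y => y)).getD 0
  let mxy := (PySem.List.max? ((comp.filter (fun p => p.1 == mx)).map Prod.snd) (fun y => y)).getD 0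
  [mn, mny, mx, mxy]

def user_logic_alt (n : Int) (m : Int) (grid : List (List Int)) : List (List Int) :=
  let init : PySem.Set (Int × Int) × List (List Int) := (PySem.Set.empty, [])
  let res := (PySem.List.pyRange 0 n 1).foldl (fun acc i =>
    (PySem.List.pyRange 0 m 1).foldl (fun acc j =>
      if getCell grid i j = 1 ∧ PySem.Set.contains acc.1 (i, j) = false then
        match loopB n m grid (fuelFor n m) [(i, j)] (PySem.Set.add acc.1 (i, j)) [] with
        | none => acc
        | some cv => (cv.2, acc.2 ++ [cornersOf cv.1])
      else acc) acc) init
  if res.2.isEmpty then [[]] else res.2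

-- ===== PRECONDITION & SPEC =====
-- Pre_ excludes exactly the inputs on which the Python A raises IndexError: a positive scan
-- rectangle that does not fit inside the given grid.
def Pre_user_logic (n : Int) (m : Int) (grid : List (List Int)) : Prop :=
  0 < n → 0 < m → n ≤ (grid.length : Int) ∧ ∀ row ∈ grid.take n.toNat, m ≤ (row.length : Int)

instance (n : Int) (m : Int) (grid : List (List Int)) : Decidable (Pre_user_logic n m grid) := by
  unfold Pre_user_logic; infer_instance

def pvWitness_user_logic : Int × Int × List (List Int) := (2, 2, [[1, 0], [0, 1]])

def Spec_user_logic (n : Int) (m : Int) (grid : List (List Int)) (out : List (List Int)) : Prop :=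
  out = user_logic_alt n m grid
instance (n : Int) (m : Int) (grid : List (List Int)) (out : List (List Int)) :
    Decidable (Spec_user_logic n m grid out) := by unfold Spec_user_logic; infer_instance

-- ===== CLAIM (what is proved, stated in full; the proofs are below) =====
def Claim_equal_user_logic : Prop := ∀ (n : Int) (m : Int) (grid : List (List Int)),
  Dom_user_logic n m grid → Pre_user_logic n m grid →
  Spec_user_logic n m grid (user_logic n m grid)

-- ===== LEMMAS AND PROOFS =====

-- proof-side helpers: restricted-corner closed form, matrix/set relation, false-cell count

def listMinD : List Int → Int
  | [] => 0
  | a :: t => t.foldl min a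

def listMaxD : List Int → Int
  | [] => 0
  | a :: t => t.foldl max a

theorem listMinD_le (l : List Int) (x : Int) (hx : x ∈ l) : listMinD l ≤ x := by
  cases l with
  | nil => simp at hx
  | cons a t =>
    simp only [listMinD]
    rcases List.mem_cons.1 hx with h | h
    · subst h; exact (PySem.List.foldl_min_le t x).1
    · exact (PySem.List.foldl_min_le t a).2 x h

theorem le_listMaxD (l : List Int) (x : Int) (hx : x ∈ l) : x ≤ listMaxD l := by
  cases l with
  | nil => simp at hx
  | cons a t =>
    simp only [listMaxD]
    rcases List.mem_cons.1 hx with h | h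
    · subst h; exact (PySem.List.le_foldl_max t x).1
    · exact (PySem.List.le_foldl_max t a).2 x h

theorem listMinD_mem (l : List Int) (h : l ≠ []) : listMinD l ∈ l := by
  cases l with
  | nil => exact absurd rfl h
  | cons a t =>
    simp only [listMinD]
    rcases PySem.List.foldl_min_mem t a with h1 | h1
    · rw [h1]; exact List.mem_cons_self
    · exact List.mem_cons_of_mem a h1

theorem listMaxD_mem (l : List Int) (h : l ≠ []) : listMaxD l ∈ l := by
  cases l with
  | nil => exact absurd rfl h
  | cons a t =>
    simp only [listMaxD]
    rcases PySem.List.foldl_max_mem t a with h1 | h1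
    · rw [h1]; exact List.mem_cons_self
    · exact List.mem_cons_of_mem a h1

theorem listMinD_insert (a b : List Int) (x : Int) (h : a ++ b ≠ []) :
    listMinD (a ++ x :: b) = min x (listMinD (a ++ b)) := by
  cases a with
  | nil =>
    cases b with
    | nil => exact absurd rfl h
    | cons c t =>
      simp only [List.nil_append, listMinD, List.foldl_cons]
      exact List.foldl_assoc
  | cons hA tA =>
    simp only [List.cons_append, listMinD, List.foldl_append, List.foldl_cons]
    rw [min_comm (List.foldl min hA tA) x]
    exact List.foldl_assoc

theorem listMaxD_insert (a b : List Int) (x : Int) (h : a ++ b ≠ []) :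
    listMaxD (a ++ x :: b) = max x (listMaxD (a ++ b)) := by
  cases a with
  | nil =>
    cases b with
    | nil => exact absurd rfl h
    | cons c t =>
      simp only [List.nil_append, listMaxD, List.foldl_cons]
      exact List.foldl_assoc
  | cons hA tA =>
    simp only [List.cons_append, listMaxD, List.foldl_append, List.foldl_cons]
    rw [max_comm (List.foldl max hA tA) x]
    exact List.foldl_assoc

def cornersQ (l : List (Int × Int)) : Int × Int × Int × Int :=
  (listMinD (l.map Prod.fst),
   listMinD ((l.filter (fun p => p.1 == listMinD (l.map Prod.fst))).map Prod.snd),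
   listMaxD (l.map Prod.fst),
   listMaxD ((l.filter (fun p => p.1 == listMaxD (l.map Prod.fst))).map Prod.snd))

def minU (a b r s : Int) : Int × Int :=
  if r < a then (r, s) else if r = a ∧ s ≤ b then (a, s) else (a, b)

def maxU (c e r s : Int) : Int × Int :=
  if r > c then (r, s) else if r = c ∧ s ≥ e then (c, s) else (c, e)

theorem updA_eq (a b c e r s : Int) :
    updA (a, b, c, e) (r, s) =
      ((minU a b r s).1, (minU a b r s).2, (maxU c e r s).1, (maxU c e r s).2) := by
  simp only [updA, minU, maxU]
  split_ifs <;> rfl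

theorem minSide (u v : List (Int × Int)) (d : Int × Int) (h : u ++ v ≠ []) :
    (listMinD ((u ++ d :: v).map Prod.fst),
     listMinD (((u ++ d :: v).filter
        (fun p => p.1 == listMinD ((u ++ d :: v).map Prod.fst))).map Prod.snd)) =
    minU (listMinD ((u ++ v).map Prod.fst))
      (listMinD (((u ++ v).filter
        (fun p => p.1 == listMinD ((u ++ v).map Prod.fst))).map Prod.snd)) d.1 d.2 := by
  have hmap : (u ++ v).map Prod.fst ≠ [] := by
    simpa using h
  have hrows : listMinD ((u ++ d :: v).map Prod.fst)
      = min d.1 (listMinD ((u ++ v).map Prod.fst)) := by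
    rw [List.map_append, List.map_cons, listMinD_insert _ _ _ (by simpa using hmap),
      ← List.map_append]
  set mn := listMinD ((u ++ v).map Prod.fst) with hmn
  rcases lt_trichotomy d.1 mn with hlt | heq | hgt
  · -- new strictly smaller row: the filtered list is exactly [d]
    have hrows' : listMinD ((u ++ d :: v).map Prod.fst) = d.1 := by
      rw [hrows]; omega
    have hnone : ∀ p ∈ u ++ v, ¬ (p.1 == d.1) = true := by
      intro p hp hpd
      have : mn ≤ p.1 := listMinD_le _ _ (List.mem_map_of_mem hp)
      simp only [beq_iff_eq] at hpd
      omega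
    have hfu : u.filter (fun p => p.1 == d.1) = [] := by
      rw [List.filter_eq_nil_iff]
      intro p hp; exact hnone p (List.mem_append_left _ hp)
    have hfv : v.filter (fun p => p.1 == d.1) = [] := by
      rw [List.filter_eq_nil_iff]
      intro p hp; exact hnone p (List.mem_append_right _ hp)
    rw [hrows']
    rw [List.filter_append, List.filter_cons]
    simp only [beq_self_eq_true, if_pos, hfu, hfv]
    simp only [List.nil_append, List.map_cons, List.map_nil, minU]
    rw [if_pos hlt]
    simp [listMinD]
  · -- equal row: the new column competes with the old restricted minimum
    have hrows' : listMinD ((u ++ d :: v).map Prod.fst) = mn := by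
      rw [hrows]; omega
    have hfl : (u ++ v).filter (fun p => p.1 == mn) ≠ [] := by
      have hmem := listMinD_mem _ hmap
      rw [← hmn] at hmem
      rcases List.mem_map.1 hmem with ⟨p, hp, hp1⟩
      intro hnil
      have : p ∈ (u ++ v).filter (fun p => p.1 == mn) :=
        List.mem_filter.2 ⟨hp, by simp [hp1]⟩
      rw [hnil] at this; simp at this
    rw [hrows']
    rw [List.filter_append, List.filter_cons]
    simp only [heq, beq_self_eq_true, if_pos]
    rw [List.map_append, List.map_cons,
      listMinD_insert _ _ _ (by rw [← List.map_append]; simpa [List.filter_append] using hfl),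
      ← List.map_append, ← List.filter_append]
    simp only [minU]
    rw [if_neg (by omega)]
    split_ifs with hc <;> simp_all [min_def]
  · -- larger row: nothing changes
    have hrows' : listMinD ((u ++ d :: v).map Prod.fst) = mn := by
      rw [hrows]; omega
    rw [hrows']
    rw [List.filter_append, List.filter_cons]
    rw [if_neg (by simp only [beq_iff_eq]; omega)]
    rw [← List.filter_append]
    simp only [minU]
    rw [if_neg (by omega), if_neg (by intro hc; omega)]

theorem maxSide (u v : List (Int × Int)) (d : Int × Int) (h : u ++ v ≠ []) :
    (listMaxD ((u ++ d :: v).map Prod.fst),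
     listMaxD (((u ++ d :: v).filter
        (fun p => p.1 == listMaxD ((u ++ d :: v).map Prod.fst))).map Prod.snd)) =
    maxU (listMaxD ((u ++ v).map Prod.fst))
      (listMaxD (((u ++ v).filter
        (fun p => p.1 == listMaxD ((u ++ v).map Prod.fst))).map Prod.snd)) d.1 d.2 := by
  have hmap : (u ++ v).map Prod.fst ≠ [] := by
    simpa using h
  have hrows : listMaxD ((u ++ d :: v).map Prod.fst)
      = max d.1 (listMaxD ((u ++ v).map Prod.fst)) := by
    rw [List.map_append, List.map_cons, listMaxD_insert _ _ _ (by simpa using hmap),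
      ← List.map_append]
  set mx := listMaxD ((u ++ v).map Prod.fst) with hmx
  rcases lt_trichotomy mx d.1 with hgt | heq | hlt
  · have hrows' : listMaxD ((u ++ d :: v).map Prod.fst) = d.1 := by
      rw [hrows]; omega
    have hnone : ∀ p ∈ u ++ v, ¬ (p.1 == d.1) = true := by
      intro p hp hpd
      have : p.1 ≤ mx := le_listMaxD _ _ (List.mem_map_of_mem hp)
      simp only [beq_iff_eq] at hpd
      omega
    have hfu : u.filter (fun p => p.1 == d.1) = [] := by
      rw [List.filter_eq_nil_iff]
      intro p hp; exact hnone p (List.mem_append_left _ hp)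
    have hfv : v.filter (fun p => p.1 == d.1) = [] := by
      rw [List.filter_eq_nil_iff]
      intro p hp; exact hnone p (List.mem_append_right _ hp)
    rw [hrows']
    rw [List.filter_append, List.filter_cons]
    simp only [beq_self_eq_true, if_pos, hfu, hfv]
    simp only [List.nil_append, List.map_cons, List.map_nil, maxU]
    rw [if_pos hgt]
    simp [listMaxD]
  · have hrows' : listMaxD ((u ++ d :: v).map Prod.fst) = mx := by
      rw [hrows]; omega
    have hfl : (u ++ v).filter (fun p => p.1 == mx) ≠ [] := by
      have hmem := listMaxD_mem _ hmap
      rw [← hmx] at hmem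
      rcases List.mem_map.1 hmem with ⟨p, hp, hp1⟩
      intro hnil
      have : p ∈ (u ++ v).filter (fun p => p.1 == mx) :=
        List.mem_filter.2 ⟨hp, by simp [hp1]⟩
      rw [hnil] at this; simp at this
    have heq' : d.1 = mx := heq.symm
    rw [hrows']
    rw [List.filter_append, List.filter_cons]
    simp only [heq', beq_self_eq_true, if_pos]
    rw [List.map_append, List.map_cons,
      listMaxD_insert _ _ _ (by rw [← List.map_append]; simpa [List.filter_append] using hfl),
      ← List.map_append, ← List.filter_append]
    simp only [maxU]
    rw [if_neg (by omega)]
    split_ifs with hc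
    · rw [max_eq_left hc.2]
    · have hlt2 : ¬ d.2 ≥ listMaxD (((u ++ v).filter (fun p => p.1 == mx)).map Prod.snd) :=
        fun hg => hc ⟨trivial, hg⟩
      rw [max_eq_right (by omega)]
  · have hrows' : listMaxD ((u ++ d :: v).map Prod.fst) = mx := by
      rw [hrows]; omega
    rw [hrows']
    rw [List.filter_append, List.filter_cons]
    rw [if_neg (by simp only [beq_iff_eq]; omega)]
    rw [← List.filter_append]
    simp only [maxU]
    rw [if_neg (by omega), if_neg (by intro hc; omega)]

theorem cornersKey (u v : List (Int × Int)) (d : Int × Int) (h : u ++ v ≠ []) :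
    cornersQ (u ++ d :: v) = updA (cornersQ (u ++ v)) d := by
  have hmin := minSide u v d h
  have hmax := maxSide u v d h
  obtain ⟨r, s⟩ := d
  simp only [cornersQ]
  rw [updA_eq]
  rw [Prod.mk.injEq] at hmin hmax
  simp only [Prod.mk.injEq]
  exact ⟨hmin.1, hmin.2, hmax.1, hmax.2⟩

def shapeV (n m : Int) (vis : List (List Bool)) : Prop :=
  vis.length = n.toNat ∧ ∀ row ∈ vis, row.length = m.toNat

def falseCount (vis : List (List Bool)) : Nat := (vis.map (fun r => r.count false)).sum

def RelV (n m : Int) (vis : List (List Bool)) (s : PySem.Set (Int × Int)) : Prop :=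
  shapeV n m vis ∧ ∀ i j : Int, 0 ≤ i → i < n → 0 ≤ j → j < m →
    (visAt vis i j = true ↔ (i, j) ∈ s)

theorem count_set_true (row : List Bool) : ∀ (b : Nat), b < row.length →
    row.getD b false = false → (row.set b true).count false + 1 = row.count false := by
  induction row with
  | nil => intro b h; simp at h
  | cons a t ih =>
    intro b hb hf
    cases b with
    | zero =>
      simp only [List.getD_cons_zero] at hf
      subst hf
      simp [List.count_cons]
    | succ b =>
      simp only [List.getD_cons_succ] at hf
      simp only [List.length_cons, Nat.add_lt_add_iff_right] at hb
      simp only [List.set_cons_succ, List.count_cons]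
      have := ih b hb hf
      omega

theorem falseCount_set (vis : List (List Bool)) : ∀ (a : Nat) (r' : List Bool),
    a < vis.length →
    falseCount (vis.set a r') + (vis.getD a []).count false
      = falseCount vis + r'.count false := by
  induction vis with
  | nil => intro a r' h; simp at h
  | cons rw0 t ih =>
    intro a r' ha
    cases a with
    | zero => simp [falseCount]; omega
    | succ a =>
      simp only [List.length_cons, Nat.add_lt_add_iff_right] at ha
      have := ih a r' ha
      simp only [List.set_cons_succ, falseCount, List.map_cons, List.sum_cons,
        List.getD_cons_succ] at *
      omega

theorem getD_row (vis : List (List Bool)) (a : Nat) (ha : a < vis.length) :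
    vis.getD a [] = vis[a] := by
  rw [List.getD_eq_getElem?_getD, List.getElem?_eq_getElem ha]; rfl

theorem markA_eq (vis : List (List Bool)) (i j : Int) (hi : 0 ≤ i) (hj : 0 ≤ j) :
    markA vis i j = vis.set i.toNat ((vis.getD i.toNat []).set j.toNat true) := by
  rw [markA, PySem.List.pyGetD_of_nonneg _ _ hi, PySem.List.pySetD_of_nonneg _ _ hj,
    PySem.List.pySetD_of_nonneg _ _ hi]

theorem visAt_eq (vis : List (List Bool)) (i j : Int) (hi : 0 ≤ i) (hj : 0 ≤ j) :
    visAt vis i j = (vis.getD i.toNat []).getD j.toNat false := by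
  rw [visAt, PySem.List.pyGetD_of_nonneg _ _ hi, PySem.List.pyGetD_of_nonneg _ _ hj]

theorem shape_markA (n m : Int) (vis : List (List Bool)) (i j : Int)
    (hs : shapeV n m vis) (hi : 0 ≤ i) (hin : i < n) (hj : 0 ≤ j) :
    shapeV n m (markA vis i j) := by
  have ha : i.toNat < vis.length := by rw [hs.1]; omega
  rw [markA_eq _ _ _ hi hj]
  constructor
  · rw [List.length_set]; exact hs.1
  · intro row hrow
    rcases List.mem_or_eq_of_mem_set hrow with h | h
    · exact hs.2 row h
    · rw [h, List.length_set, getD_row _ _ ha]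
      exact hs.2 _ (List.getElem_mem ha)

theorem falseCount_markA (n m : Int) (vis : List (List Bool)) (i j : Int)
    (hs : shapeV n m vis) (hi : 0 ≤ i) (hin : i < n) (hj : 0 ≤ j) (hjm : j < m)
    (hv : visAt vis i j = false) : falseCount (markA vis i j) + 1 = falseCount vis := by
  have ha : i.toNat < vis.length := by rw [hs.1]; omega
  have hrowlen : (vis.getD i.toNat []).length = m.toNat := by
    rw [getD_row _ _ ha]; exact hs.2 _ (List.getElem_mem ha)
  have hb : j.toNat < (vis.getD i.toNat []).length := by rw [hrowlen]; omega
  rw [visAt_eq _ _ _ hi hj] at hv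
  rw [markA_eq _ _ _ hi hj]
  have h1 := falseCount_set vis i.toNat ((vis.getD i.toNat []).set j.toNat true) ha
  have h2 := count_set_true (vis.getD i.toNat []) j.toNat hb hv
  omega

theorem fc_le (n m : Int) (vis : List (List Bool)) (hs : shapeV n m vis) :
    falseCount vis ≤ n.toNat * m.toNat := by
  obtain ⟨hlen, hrows⟩ := hs
  have : ∀ (l : List (List Bool)), (∀ row ∈ l, row.length = m.toNat) →
      (l.map (fun r => r.count false)).sum ≤ l.length * m.toNat := by
    intro l
    induction l with
    | nil => intro _; simp
    | cons a t ih =>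
      intro h
      simp only [List.map_cons, List.sum_cons, List.length_cons]
      have h1 : a.count false ≤ m.toNat := by
        rw [← h a (List.mem_cons_self)]; exact List.count_le_length
      have h2 := ih (fun row hr => h row (List.mem_cons_of_mem a hr))
      calc a.count false + (t.map (fun r => r.count false)).sum
          ≤ m.toNat + t.length * m.toNat := by omega
        _ = (t.length + 1) * m.toNat := by ring
  rw [falseCount, ← hlen]
  exact this vis hrows

theorem getD_set_eq' {α : Type} (l : List α) (a : Nat) (r d : α) (ha : a < l.length) :
    (l.set a r).getD a d = r := by
  rw [List.getD_eq_getElem?_getD, List.getElem?_set]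
  simp [ha]

theorem getD_set_ne' {α : Type} (l : List α) (a a' : Nat) (r d : α) (h : a ≠ a') :
    (l.set a r).getD a' d = l.getD a' d := by
  rw [List.getD_eq_getElem?_getD, List.getElem?_set, if_neg h, ← List.getD_eq_getElem?_getD]

theorem visAt_markA_self (n m : Int) (vis : List (List Bool)) (i j : Int)
    (hs : shapeV n m vis) (hi : 0 ≤ i) (hin : i < n) (hj : 0 ≤ j) (hjm : j < m) :
    visAt (markA vis i j) i j = true := by
  have ha : i.toNat < vis.length := by rw [hs.1]; omega
  have hrowlen : (vis.getD i.toNat []).length = m.toNat := by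
    rw [getD_row _ _ ha]; exact hs.2 _ (List.getElem_mem ha)
  have hb : j.toNat < (vis.getD i.toNat []).length := by rw [hrowlen]; omega
  rw [markA_eq _ _ _ hi hj, visAt_eq _ _ _ hi hj]
  rw [getD_set_eq' _ _ _ _ ha, getD_set_eq' _ _ _ _ hb]

theorem visAt_markA_other (n m : Int) (vis : List (List Bool)) (i j i' j' : Int)
    (_hs : shapeV n m vis) (hi : 0 ≤ i) (hj : 0 ≤ j) (hi' : 0 ≤ i') (hj' : 0 ≤ j')
    (hne : ¬ (i' = i ∧ j' = j)) :
    visAt (markA vis i j) i' j' = visAt vis i' j' := by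
  rw [markA_eq _ _ _ hi hj, visAt_eq _ _ _ hi' hj', visAt_eq _ _ _ hi' hj']
  by_cases hii : i.toNat = i'.toNat
  · have hjne : j.toNat ≠ j'.toNat := by omega
    by_cases hlt : i.toNat < vis.length
    · rw [hii] at hlt ⊢
      rw [getD_set_eq' _ _ _ _ hlt, getD_set_ne' _ _ _ _ _ hjne]
    · rw [List.set_eq_of_length_le (by omega)]
  · rw [getD_set_ne' _ _ _ _ _ hii]

theorem RelV_mark (n m : Int) (vis : List (List Bool)) (s : PySem.Set (Int × Int)) (i j : Int)
    (hR : RelV n m vis s) (hi : 0 ≤ i) (hin : i < n) (hj : 0 ≤ j) (hjm : j < m) :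
    RelV n m (markA vis i j) (PySem.Set.add s (i, j)) := by
  obtain ⟨hs, hiff⟩ := hR
  refine ⟨shape_markA n m vis i j hs hi hin hj, ?_⟩
  intro i' j' hi' hin' hj' hjm'
  rw [PySem.Set.mem_add]
  by_cases he : i' = i ∧ j' = j
  · obtain ⟨he1, he2⟩ := he; subst he1; subst he2
    rw [visAt_markA_self n m vis i' j' hs hi' hin' hj' hjm']
    simp
  · rw [visAt_markA_other n m vis i j i' j' hs hi hj hi' hj' he]
    rw [hiff i' j' hi' hin' hj' hjm']
    constructor
    · exact Or.inl
    · rintro (h | h)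
      · exact h
      · exfalso; apply he; rw [Prod.mk.injEq] at h; exact h


theorem min?_getD (l : List Int) (h : l ≠ []) :
    (PySem.List.min? l (fun y => y)).getD 0 = listMinD l := by
  cases l with
  | nil => exact absurd rfl h
  | cons a t => rw [PySem.List.min?_id_cons]; rfl

theorem max?_getD (l : List Int) (h : l ≠ []) :
    (PySem.List.max? l (fun y => y)).getD 0 = listMaxD l := by
  cases l with
  | nil => exact absurd rfl h
  | cons a t => rw [PySem.List.max?_id_cons]; rfl

theorem filter_min_ne (l : List (Int × Int)) (h : l ≠ []) :
    (l.filter (fun p => p.1 == listMinD (l.map Prod.fst))).map Prod.snd ≠ [] := by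
  have hm := listMinD_mem (l.map Prod.fst) (by simpa using h)
  rcases List.mem_map.1 hm with ⟨p, hp, hp1⟩
  intro hnil
  rw [List.map_eq_nil_iff] at hnil
  have : p ∈ l.filter (fun p => p.1 == listMinD (l.map Prod.fst)) :=
    List.mem_filter.2 ⟨hp, by simp [hp1]⟩
  rw [hnil] at this; simp at this

theorem filter_max_ne (l : List (Int × Int)) (h : l ≠ []) :
    (l.filter (fun p => p.1 == listMaxD (l.map Prod.fst))).map Prod.snd ≠ [] := by
  have hm := listMaxD_mem (l.map Prod.fst) (by simpa using h)
  rcases List.mem_map.1 hm with ⟨p, hp, hp1⟩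
  intro hnil
  rw [List.map_eq_nil_iff] at hnil
  have : p ∈ l.filter (fun p => p.1 == listMaxD (l.map Prod.fst)) :=
    List.mem_filter.2 ⟨hp, by simp [hp1]⟩
  rw [hnil] at this; simp at this

theorem cornersOf_eq (comp : List (Int × Int)) (h : comp ≠ []) :
    cornersOf comp = [(cornersQ comp).1, (cornersQ comp).2.1,
                      (cornersQ comp).2.2.1, (cornersQ comp).2.2.2] := by
  have hmap : comp.map Prod.fst ≠ [] := by simpa using h
  simp only [cornersOf, cornersQ]
  rw [min?_getD _ hmap, max?_getD _ hmap,
    min?_getD _ (filter_min_ne _ h), max?_getD _ (filter_max_ne _ h)]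

theorem cornersQ_single (i j : Int) : cornersQ [(i, j)] = (i, j, i, j) := by
  simp [cornersQ, listMinD, listMaxD]

theorem stepPair (n m : Int) (grid : List (List Int)) (i j : Int)
    (st : List (Int × Int)) (vis : List (List Bool)) (s : PySem.Set (Int × Int))
    (q : Int × Int × Int × Int) (comp : List (Int × Int)) (d : Int × Int)
    (hR : RelV n m vis s) (hc : comp ≠ []) (hq : q = cornersQ (comp ++ st)) :
    (stepA n m grid i j (st, vis, q) d).1 = (stepB n m grid i j (st, s) d).1 ∧
    RelV n m (stepA n m grid i j (st, vis, q) d).2.1 (stepB n m grid i j (st, s) d).2 ∧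
    (stepA n m grid i j (st, vis, q) d).2.2 =
      cornersQ (comp ++ (stepA n m grid i j (st, vis, q) d).1) := by
  simp only [stepA, stepB]
  by_cases h1 : 0 ≤ i + d.1 ∧ i + d.1 < n ∧ 0 ≤ j + d.2 ∧ j + d.2 < m
  · obtain ⟨hni0, hnin, hnj0, hnjm⟩ := h1
    have hiff := hR.2 (i + d.1) (j + d.2) hni0 hnin hnj0 hnjm
    by_cases h2 : visAt vis (i + d.1) (j + d.2) = false
    · have hcont : PySem.Set.contains s (i + d.1, j + d.2) = false := by
        cases hcc : PySem.Set.contains s (i + d.1, j + d.2) with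
        | false => rfl
        | true =>
          exfalso
          have := (PySem.Set.contains_iff s (i + d.1, j + d.2)).1 hcc
          rw [← hiff] at this
          rw [h2] at this; exact Bool.false_ne_true this
      by_cases h3 : getCell grid (i + d.1) (j + d.2) = 1
      · rw [if_pos ⟨hni0, hnin, hnj0, hnjm, h2, h3⟩, if_pos ⟨hni0, hnin, hnj0, hnjm, hcont, h3⟩]
        refine ⟨rfl, RelV_mark n m vis s _ _ hR hni0 hnin hnj0 hnjm, ?_⟩
        rw [hq]
        exact (cornersKey comp st (i + d.1, j + d.2) (by simp [hc])).symm
      · rw [if_neg (by intro hcon; exact h3 hcon.2.2.2.2.2),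
          if_neg (by intro hcon; exact h3 hcon.2.2.2.2.2)]
        exact ⟨rfl, hR, hq⟩
    · have h2' : visAt vis (i + d.1) (j + d.2) = true := by
        cases hvv : visAt vis (i + d.1) (j + d.2) with
        | false => exact absurd hvv h2
        | true => rfl
      have hcont : PySem.Set.contains s (i + d.1, j + d.2) = true :=
        (PySem.Set.contains_iff s (i + d.1, j + d.2)).2 (hiff.1 h2')
      rw [if_neg (fun hcon => by have hx := hcon.2.2.2.2.1; rw [h2'] at hx; exact Bool.noConfusion hx),
        if_neg (fun hcon => by have hx := hcon.2.2.2.2.1; rw [hcont] at hx; exact Bool.noConfusion hx)]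
      exact ⟨rfl, hR, hq⟩
  · rw [if_neg (by intro hcon; exact h1 ⟨hcon.1, hcon.2.1, hcon.2.2.1, hcon.2.2.2.1⟩),
      if_neg (by intro hcon; exact h1 ⟨hcon.1, hcon.2.1, hcon.2.2.1, hcon.2.2.2.1⟩)]
    exact ⟨rfl, hR, hq⟩

theorem foldPair (n m : Int) (grid : List (List Int)) (i j : Int) (comp : List (Int × Int))
    (hc : comp ≠ []) : ∀ (ds : List (Int × Int)) (st : List (Int × Int))
    (vis : List (List Bool)) (s : PySem.Set (Int × Int)) (q : Int × Int × Int × Int),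
    RelV n m vis s → q = cornersQ (comp ++ st) →
    (ds.foldl (stepA n m grid i j) (st, vis, q)).1 = (ds.foldl (stepB n m grid i j) (st, s)).1 ∧
    RelV n m (ds.foldl (stepA n m grid i j) (st, vis, q)).2.1
      (ds.foldl (stepB n m grid i j) (st, s)).2 ∧
    (ds.foldl (stepA n m grid i j) (st, vis, q)).2.2 =
      cornersQ (comp ++ (ds.foldl (stepA n m grid i j) (st, vis, q)).1) := by
  intro ds
  induction ds with
  | nil => intro st vis s q hR hq; exact ⟨rfl, hR, hq⟩
  | cons d ds ih =>
    intro st vis s q hR hq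
    obtain ⟨he1, hR1, hq1⟩ := stepPair n m grid i j st vis s q comp d hR hc hq
    simp only [List.foldl_cons]
    have heta : stepB n m grid i j (st, s) d =
        ((stepA n m grid i j (st, vis, q) d).1, (stepB n m grid i j (st, s) d).2) := by
      rw [he1]
    rw [heta]
    exact ih (stepA n m grid i j (st, vis, q) d).1 (stepA n m grid i j (st, vis, q) d).2.1
      (stepB n m grid i j (st, s) d).2 (stepA n m grid i j (st, vis, q) d).2.2 hR1 hq1

theorem foldMeasure (n m : Int) (grid : List (List Int)) (i j : Int) :
    ∀ (ds : List (Int × Int)) (st : List (Int × Int)) (vis : List (List Bool))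
      (q : Int × Int × Int × Int), shapeV n m vis →
    shapeV n m (ds.foldl (stepA n m grid i j) (st, vis, q)).2.1 ∧
    (ds.foldl (stepA n m grid i j) (st, vis, q)).1.length +
      2 * falseCount (ds.foldl (stepA n m grid i j) (st, vis, q)).2.1 ≤
      st.length + 2 * falseCount vis := by
  intro ds
  induction ds with
  | nil => intro st vis q hs; exact ⟨hs, le_refl _⟩
  | cons d ds ih =>
    intro st vis q hs
    simp only [List.foldl_cons, stepA]
    by_cases h1 : 0 ≤ i + d.1 ∧ i + d.1 < n ∧ 0 ≤ j + d.2 ∧ j + d.2 < m ∧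
        visAt vis (i + d.1) (j + d.2) = false ∧ getCell grid (i + d.1) (j + d.2) = 1
    · obtain ⟨hni0, hnin, hnj0, hnjm, hv, hg⟩ := h1
      rw [if_pos ⟨hni0, hnin, hnj0, hnjm, hv, hg⟩]
      have hfc := falseCount_markA n m vis _ _ hs hni0 hnin hnj0 hnjm hv
      have hsh := shape_markA n m vis _ _ hs hni0 hnin hnj0
      obtain ⟨hsh', hle⟩ := ih ((i + d.1, j + d.2) :: st) (markA vis (i + d.1) (j + d.2))
        (updA q (i + d.1, j + d.2)) hsh
      refine ⟨hsh', ?_⟩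
      simp only [List.length_cons] at hle
      omega
    · rw [if_neg h1]
      exact ih st vis q hs

theorem suffA (n m : Int) (grid : List (List Int)) :
    ∀ (f : Nat) (st : List (Int × Int)) (vis : List (List Bool)) (q : Int × Int × Int × Int),
    shapeV n m vis → st.length + 2 * falseCount vis < f →
    loopA n m grid f st vis q ≠ none := by
  intro f
  induction f with
  | zero => intro st vis q _ h; omega
  | succ f ih =>
    intro st vis q hs h
    match st with
    | [] => simp [loopA]
    | (i, j) :: rest =>
      simp only [loopA]
      obtain ⟨hsh, hle⟩ := foldMeasure n m grid i j dirs rest vis q hs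
      apply ih _ _ _ hsh
      simp only [List.length_cons] at h
      omega

theorem pairLoop (n m : Int) (grid : List (List Int)) :
    ∀ (f : Nat) (st : List (Int × Int)) (vis : List (List Bool)) (s : PySem.Set (Int × Int))
      (q : Int × Int × Int × Int) (comp : List (Int × Int)),
    RelV n m vis s → comp ++ st ≠ [] → q = cornersQ (comp ++ st) →
    match loopA n m grid f st vis q, loopB n m grid f st s comp with
    | none, none => True
    | some (qf, visf), some (compf, sf) => compf ≠ [] ∧ qf = cornersQ compf ∧ RelV n m visf sf
    | _, _ => False := by
  intro f
  induction f with
  | zero =>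
    intro st vis s q comp _ _ _
    simp [loopA, loopB]
  | succ f ih =>
    intro st vis s q comp hR hne hq
    match st with
    | [] =>
      simp only [loopA, loopB]
      refine ⟨by simpa using hne, by simpa using hq, hR⟩
    | (i, j) :: rest =>
      simp only [loopA, loopB]
      have hc' : comp ++ [(i, j)] ≠ [] := by simp
      rw [List.append_cons] at hq
      obtain ⟨he1, hR1, hq1⟩ :=
        foldPair n m grid i j (comp ++ [(i, j)]) hc' dirs rest vis s q hR hq
      have heta : (dirs.foldl (stepB n m grid i j) (rest, s)) =
          ((dirs.foldl (stepA n m grid i j) (rest, vis, q)).1,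
           (dirs.foldl (stepB n m grid i j) (rest, s)).2) := by
        rw [he1]
      rw [heta]
      exact ih (dirs.foldl (stepA n m grid i j) (rest, vis, q)).1
        (dirs.foldl (stepA n m grid i j) (rest, vis, q)).2.1
        (dirs.foldl (stepB n m grid i j) (rest, s)).2
        (dirs.foldl (stepA n m grid i j) (rest, vis, q)).2.2
        (comp ++ [(i, j)]) hR1 (by simp) hq1

theorem RelV_init (n m : Int) :
    RelV n m (List.replicate n.toNat (List.replicate m.toNat false)) PySem.Set.empty := by
  refine ⟨⟨by simp, fun row h => by rw [List.eq_of_mem_replicate h]; simp⟩, ?_⟩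
  intro i j hi hin hj hjm
  have hv : visAt (List.replicate n.toNat (List.replicate m.toNat false)) i j = false := by
    rw [visAt_eq _ _ _ hi hj]
    have h1 : (List.replicate n.toNat (List.replicate m.toNat false)).getD i.toNat []
        = List.replicate m.toNat false := by
      rw [List.getD_eq_getElem?_getD, List.getElem?_replicate, if_pos (by omega)]
      rfl
    rw [h1, List.getD_eq_getElem?_getD, List.getElem?_replicate]
    split_ifs <;> rfl
  rw [hv]
  constructor
  · intro h; exact absurd h Bool.false_ne_true
  · intro h; exact absurd h (List.not_mem_nil)

theorem foldl_rel {α β γ : Type} (P : α → β → Prop) (fA : α → γ → α) (fB : β → γ → β) :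
    ∀ (js : List γ) (a : α) (b : β),
    (∀ x ∈ js, ∀ a b, P a b → P (fA a x) (fB b x)) → P a b →
    P (js.foldl fA a) (js.foldl fB b) := by
  intro js
  induction js with
  | nil => intro a b _ h; exact h
  | cons x t ih =>
    intro a b hstep h
    simp only [List.foldl_cons]
    exact ih _ _ (fun y hy => hstep y (List.mem_cons_of_mem x hy))
      (hstep x List.mem_cons_self a b h)

theorem cellPair (n m : Int) (grid : List (List Int)) (i j : Int)
    (hi : 0 ≤ i) (hin : i < n) (hj : 0 ≤ j) (hjm : j < m)
    (accA : List (List Bool) × List (List Int)) (accB : PySem.Set (Int × Int) × List (List Int))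
    (h : RelV n m accA.1 accB.1 ∧ accA.2 = accB.2) :
    RelV n m ((if getCell grid i j = 1 ∧ visAt accA.1 i j = false then
        if n = 200 ∧ m = 30 then
          match loopA n m grid (fuelFor n m) [(i, j)] (markA accA.1 i j) (i, j, i, j) with
          | some (q, vis') => (vis', accA.2 ++ [[q.1, q.2.1, q.2.2.1, q.2.2.2]])
          | none => accA
        else
          match loopA n m grid (fuelFor n m) [(i, j)] (markA accA.1 i j) (i, j, i, j) with
          | some (q, vis') => (vis', accA.2 ++ [[q.1, q.2.1, q.2.2.1, q.2.2.2]])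
          | none => accA
      else accA).1)
      ((if getCell grid i j = 1 ∧ PySem.Set.contains accB.1 (i, j) = false then
        match loopB n m grid (fuelFor n m) [(i, j)] (PySem.Set.add accB.1 (i, j)) [] with
        | none => accB
        | some cv => (cv.2, accB.2 ++ [cornersOf cv.1])
      else accB).1) ∧
    ((if getCell grid i j = 1 ∧ visAt accA.1 i j = false then
        if n = 200 ∧ m = 30 then
          match loopA n m grid (fuelFor n m) [(i, j)] (markA accA.1 i j) (i, j, i, j) with
          | some (q, vis') => (vis', accA.2 ++ [[q.1, q.2.1, q.2.2.1, q.2.2.2]])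
          | none => accA
        else
          match loopA n m grid (fuelFor n m) [(i, j)] (markA accA.1 i j) (i, j, i, j) with
          | some (q, vis') => (vis', accA.2 ++ [[q.1, q.2.1, q.2.2.1, q.2.2.2]])
          | none => accA
      else accA).2) =
      ((if getCell grid i j = 1 ∧ PySem.Set.contains accB.1 (i, j) = false then
        match loopB n m grid (fuelFor n m) [(i, j)] (PySem.Set.add accB.1 (i, j)) [] with
        | none => accB
        | some cv => (cv.2, accB.2 ++ [cornersOf cv.1])
      else accB).2) := by
  obtain ⟨hR, hb⟩ := h
  rw [ite_self (c := n = 200 ∧ m = 30)]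
  by_cases hg : getCell grid i j = 1
  · have hiff := hR.2 i j hi hin hj hjm
    by_cases hv : visAt accA.1 i j = false
    · have hcont : PySem.Set.contains accB.1 (i, j) = false := by
        cases hcc : PySem.Set.contains accB.1 (i, j) with
        | false => rfl
        | true =>
          exfalso
          have := (PySem.Set.contains_iff accB.1 (i, j)).1 hcc
          rw [← hiff] at this
          rw [hv] at this; exact Bool.noConfusion this
      rw [if_pos ⟨hg, hv⟩, if_pos ⟨hg, hcont⟩]
      have hshm := shape_markA n m accA.1 i j hR.1 hi hin hj
      have hfc := falseCount_markA n m accA.1 i j hR.1 hi hin hj hjm hv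
      have hfcle := fc_le n m accA.1 hR.1
      cases hL : loopA n m grid (fuelFor n m) [(i, j)] (markA accA.1 i j) (i, j, i, j) with
      | none =>
        exact absurd hL (suffA n m grid (fuelFor n m) [(i, j)] (markA accA.1 i j)
          (i, j, i, j) hshm (by simp only [List.length_cons, List.length_nil, fuelFor]; omega))
      | some p =>
        obtain ⟨qf, visf⟩ := p
        have hpair := pairLoop n m grid (fuelFor n m) [(i, j)] (markA accA.1 i j)
          (PySem.Set.add accB.1 (i, j)) (i, j, i, j) []
          (RelV_mark n m accA.1 accB.1 i j hR hi hin hj hjm) (by simp)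
          (by rw [List.nil_append, cornersQ_single])
        rw [hL] at hpair
        cases hB : loopB n m grid (fuelFor n m) [(i, j)] (PySem.Set.add accB.1 (i, j)) [] with
        | none => rw [hB] at hpair; exact absurd hpair (by simp)
        | some pB =>
          obtain ⟨compf, sf⟩ := pB
          rw [hB] at hpair
          obtain ⟨hcne, hqf, hRf⟩ := hpair
          refine ⟨hRf, ?_⟩
          show (accA.2 ++ [[qf.1, qf.2.1, qf.2.2.1, qf.2.2.2]]) = (accB.2 ++ [cornersOf compf])
          rw [hb, cornersOf_eq compf hcne, hqf]
    · have hv' : visAt accA.1 i j = true := by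
        cases hvv : visAt accA.1 i j with
        | false => exact absurd hvv hv
        | true => rfl
      have hcont : PySem.Set.contains accB.1 (i, j) = true :=
        (PySem.Set.contains_iff accB.1 (i, j)).2 (hiff.1 hv')
      rw [if_neg (fun hcon => by have hx := hcon.2; rw [hv'] at hx; exact Bool.noConfusion hx),
        if_neg (fun hcon => by have hx := hcon.2; rw [hcont] at hx; exact Bool.noConfusion hx)]
      exact ⟨hR, hb⟩
  · rw [if_neg (fun hcon => hg hcon.1), if_neg (fun hcon => hg hcon.1)]
    exact ⟨hR, hb⟩

-- ===== VERDICT (by name: the statement is the Claim_ definition above) =====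
theorem user_logic_spec : Claim_equal_user_logic := by
  intro n m grid _ _
  unfold Spec_user_logic user_logic user_logic_alt
  have hres := foldl_rel
    (fun (accA : List (List Bool) × List (List Int))
         (accB : PySem.Set (Int × Int) × List (List Int)) =>
      RelV n m accA.1 accB.1 ∧ accA.2 = accB.2)
    (fun acc i =>
      (PySem.List.pyRange 0 m 1).foldl (fun acc j =>
        if getCell grid i j = 1 ∧ visAt acc.1 i j = false then
          if n = 200 ∧ m = 30 then
            match loopA n m grid (fuelFor n m) [(i, j)] (markA acc.1 i j) (i, j, i, j) with
            | some (q, vis') => (vis', acc.2 ++ [[q.1, q.2.1, q.2.2.1, q.2.2.2]])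
            | none => acc
          else
            match loopA n m grid (fuelFor n m) [(i, j)] (markA acc.1 i j) (i, j, i, j) with
            | some (q, vis') => (vis', acc.2 ++ [[q.1, q.2.1, q.2.2.1, q.2.2.2]])
            | none => acc
        else acc) acc)
    (fun acc i =>
      (PySem.List.pyRange 0 m 1).foldl (fun acc j =>
        if getCell grid i j = 1 ∧ PySem.Set.contains acc.1 (i, j) = false then
          match loopB n m grid (fuelFor n m) [(i, j)] (PySem.Set.add acc.1 (i, j)) [] with
          | none => acc
          | some cv => (cv.2, acc.2 ++ [cornersOf cv.1])
        else acc) acc)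
    (PySem.List.pyRange 0 n 1)
    (List.replicate n.toNat (List.replicate m.toNat false), [])
    (PySem.Set.empty, [])
    (by
      intro i hi accA accB h
      have hib := PySem.List.mem_pyRange_one.1 hi
      exact foldl_rel _ _ _ (PySem.List.pyRange 0 m 1) accA accB
        (fun j hj accA' accB' h' =>
          have hjb := PySem.List.mem_pyRange_one.1 hj
          cellPair n m grid i j hib.1 hib.2 hjb.1 hjb.2 accA' accB' h') h)
    ⟨RelV_init n m, rfl⟩
  have hfin : ∀ l : List (List Int),
      (match l with | [] => ([[]] : List (List Int)) | l => l) = (if l.isEmpty then [[]] else l) := by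
    intro l; cases l <;> rfl
  exact (congrArg (fun l => match l with | [] => ([[]] : List (List Int)) | l => l) hres.2).trans
    (hfin _)
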